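-- pv_equiv track=rewrite | github.com/DewPeaceTigers/AlgorithmStudy | weeks/week_24/PG_17687/minji.py | solution
-- ===== SOURCE A (Python) =====
-- def solution(n, t, m, p):
--     answer = ''
--     num="0123456789ABCDEF"
--     convert_list=[]
--     def convert(i, n) : #n진수로 변환
--         q, r=divmod(i, n)
--         if q==0 :
--             return num[r]
--         else:
--             return convert(q, n)+num[r]
--
--     for i in range(t*m) : #list에 저장
--         conv=convert(i, n)
--         for c in conv :
--             convert_list.append(c)
--
--     for i in range(p-1, t*m, m) :
--         answer+=convert_list[i]
--     return answer
-- ===== SOURCE B (Python) =====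
-- def solution(n, t, m, p):
--     num = "0123456789ABCDEF"
--
--     def digits(i):  # base-n remainders collected low-to-high, then rendered in reverse
--         rs = []
--         while True:
--             i, r = divmod(i, n)
--             rs.append(r)
--             if i == 0:
--                 break
--         return [num[r] for r in reversed(rs)]
--
--     stream = [c for i in range(t * m) for c in digits(i)]
--     return "".join(stream)[p - 1 : t * m : m]
-- ===== Notes on version B (the rewrite author's own statement) =====
-- stated objective: idiomatic
-- what changed: B replaces the recursive convert helper by a loop that only collects the remainders (rendering them to digit characters in one reversed comprehension at the end), builds the whole digit stream with a flat list comprehension instead of A's nested append loops, and replaces A's strided index loop by a single extended slice s[p-1:t*m:m].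
-- outside the precondition, e.g. on solution(2, 1, 2, 0): A returns '11', B returns '1'; on solution(1, 1, 1, 1): A returns '0', B returns '0'; on solution(2, -2, -2, 6): A returns '1', B returns '1'
import Mathlib
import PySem

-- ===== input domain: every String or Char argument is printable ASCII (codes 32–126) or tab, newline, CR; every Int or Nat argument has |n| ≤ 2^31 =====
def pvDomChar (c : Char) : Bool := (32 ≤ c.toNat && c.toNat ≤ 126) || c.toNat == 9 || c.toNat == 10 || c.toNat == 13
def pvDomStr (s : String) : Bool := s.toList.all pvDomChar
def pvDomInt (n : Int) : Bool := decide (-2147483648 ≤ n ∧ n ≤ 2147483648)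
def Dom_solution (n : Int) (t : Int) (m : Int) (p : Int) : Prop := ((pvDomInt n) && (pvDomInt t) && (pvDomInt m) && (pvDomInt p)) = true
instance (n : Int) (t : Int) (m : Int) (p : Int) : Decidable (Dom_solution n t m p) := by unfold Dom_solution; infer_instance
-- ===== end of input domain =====

-- B collects only the base-n remainders in a loop, renders them with one reversed map at the end,
-- builds the digit stream as a flat list comprehension, and answers with the slice s[p-1:t*m:m]
-- (objective: idiomatic; same asymptotic cost).  No argument is mutated by either version.

-- the digit alphabet both Python versions name `num`
def pvNum : String := "0123456789ABCDEF"

-- ===== PORT A =====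
-- recursive helper `convert`; fuel makes the recursion total (inside Pre_ the fuel i.toNat+1 is never exhausted)
def convertA (fuel : Nat) (i : Int) (n : Int) : String :=
  match fuel with
  | 0 => ""
  | fuel + 1 =>
    let q := PySem.Int.floordiv i n
    let r := PySem.Int.mod i n
    if q = 0 then
      String.singleton ((PySem.Str.pyGet? pvNum r).getD ' ')
    else
      convertA fuel q n ++ String.singleton ((PySem.Str.pyGet? pvNum r).getD ' ')

def solution (n : Int) (t : Int) (m : Int) (p : Int) : String :=
  let convert_list : List Char :=
    (PySem.List.pyRange 0 (t * m) 1).foldl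
      (fun acc i => (convertA (i.toNat + 1) i n).toList.foldl (fun l c => l ++ [c]) acc) []
  (PySem.List.pyRange (p - 1) (t * m) m).foldl
    (fun ans i => ans ++ String.singleton (PySem.List.pyGetD convert_list i ' ')) ""

-- ===== PORT B =====
-- the while loop collecting remainders into `rs` (append; break when the quotient is 0);
-- fuel makes the loop total, never exhausted inside Pre_
def remsB (fuel : Nat) (i : Int) (n : Int) (rs : List Int) : List Int :=
  match fuel with
  | 0 => rs
  | fuel + 1 =>
    let q := PySem.Int.floordiv i n
    let rs' := rs ++ [PySem.Int.mod i n]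
    if q = 0 then rs' else remsB fuel q n rs'

-- `[num[r] for r in reversed(rs)]`
def digitsB (i : Int) (n : Int) : List Char :=
  (remsB (i.toNat + 1) i n []).reverse.map (fun r => (PySem.Str.pyGet? pvNum r).getD ' ')

def solution_alt (n : Int) (t : Int) (m : Int) (p : Int) : String :=
  let stream : List Char := (PySem.List.pyRange 0 (t * m) 1).flatMap (fun i => digitsB i n)
  (PySem.Str.slice? (String.ofList stream) (some (p - 1)) (some (t * m)) m).getD ""

-- ===== PRECONDITION & SPEC =====
-- Pre_ admits every input on which both of A's loops are vacuous (A answers '' for any n and p) plus the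
-- working domain 1 ≤ m, 1 ≤ p, 1 ≤ t with a usable base n in ±[2,16].  It excludes: n outside ±[2,16]
-- with a nonempty digit loop (A raises ZeroDivisionError/IndexError, or recurses without bound — except
-- n = 1 with t*m = 1, where it still answers), m = 0 with a live answer loop (ValueError), m < 0 with
-- t*m > 0 (IndexError on most inputs), and p ≤ 0 with t*m > 0, where A's answer comes from Python's
-- accidental negative-index wraparound of the range start.
def Pre_solution (n : Int) (t : Int) (m : Int) (p : Int) : Prop :=
  (1 ≤ m ∧ t * m ≤ p - 1 ∧ t * m ≤ 0)
  ∨ (m ≤ -1 ∧ p - 1 ≤ t * m ∧ t * m ≤ 0)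
  ∨ (1 ≤ m ∧ 1 ≤ p ∧ 1 ≤ t ∧ ((2 ≤ n ∧ n ≤ 16) ∨ (-16 ≤ n ∧ n ≤ -2)))
instance (n : Int) (t : Int) (m : Int) (p : Int) : Decidable (Pre_solution n t m p) := by
  unfold Pre_solution; infer_instance

def pvWitness_solution : Int × Int × Int × Int := (2, 3, 2, 2)

def Spec_solution (n : Int) (t : Int) (m : Int) (p : Int) (out : String) : Prop := out = solution_alt n t m p
instance (n : Int) (t : Int) (m : Int) (p : Int) (out : String) : Decidable (Spec_solution n t m p out) := by
  unfold Spec_solution; infer_instance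

-- ===== CLAIM (what is proved, stated in full; the proofs are below) =====
def Claim_equal_solution : Prop := ∀ (n : Int) (t : Int) (m : Int) (p : Int), Dom_solution n t m p → Pre_solution n t m p → Spec_solution n t m p (solution n t m p)

-- ===== LEMMAS AND PROOFS =====

-- rendering B's collected remainders in reverse yields A's convert, followed by the rendered accumulator
theorem remsB_render (fuel : Nat) : ∀ (i n : Int) (rs : List Int),
    (remsB fuel i n rs).reverse.map (fun r => (PySem.Str.pyGet? pvNum r).getD ' ')
      = (convertA fuel i n).toList
        ++ rs.reverse.map (fun r => (PySem.Str.pyGet? pvNum r).getD ' ') := by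
  induction fuel with
  | zero => intro i n rs; simp [remsB, convertA]
  | succ f ih =>
    intro i n rs
    simp only [remsB, convertA]
    by_cases hq : PySem.Int.floordiv i n = 0
    · simp [hq]
    · simp only [hq, ite_false, ih]
      simp

-- so each number contributes exactly A's converted digits to B's stream
theorem digitsB_eq_convertA (i n : Int) :
    digitsB i n = (convertA (i.toNat + 1) i n).toList := by
  simp only [digitsB]
  simpa using remsB_render (i.toNat + 1) i n []

theorem foldl_append_singleton (l : List Char) : ∀ (acc : List Char),
    l.foldl (fun a c => a ++ [c]) acc = acc ++ l := by
  induction l with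
  | nil => intro acc; simp
  | cons c l ih => intro acc; simp [ih]

-- each converted number contributes at least one character
theorem convertA_len (f : Nat) (i n : Int) : 1 ≤ (convertA (f + 1) i n).toList.length := by
  simp only [convertA]
  by_cases hq : PySem.Int.floordiv i n = 0 <;> simp [hq]

theorem stream_len (n : Int) (is : List Int) : ∀ (accL : List Char),
    accL.length + is.length ≤
      (is.foldl (fun acc i => acc ++ (convertA (i.toNat + 1) i n).toList) accL).length := by
  induction is with
  | nil => intro accL; simp
  | cons i is ih =>
    intro accL
    simp only [List.foldl_cons, List.length_cons]
    have h1 := convertA_len (i.toNat) i n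
    have h2 := ih (accL ++ (convertA (i.toNat + 1) i n).toList)
    simp only [List.length_append] at h2
    omega

theorem foldl_push_toList (g : Int → Char) (is : List Int) : ∀ (acc : String),
    (is.foldl (fun ans i => ans ++ String.singleton (g i)) acc).toList
      = acc.toList ++ is.map g := by
  induction is with
  | nil => intro acc; simp
  | cons i is ih =>
    intro acc
    rw [List.foldl_cons, ih]
    simp

theorem filterMap_congr_some {α β : Type} (f : α → Option β) (g : α → β) :
    ∀ (l : List α), (∀ x ∈ l, f x = some (g x)) → l.filterMap f = l.map g := by
  intro l
  induction l with
  | nil => intro _; simp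
  | cons x l ih =>
    intro h
    simp only [List.filterMap_cons, List.map_cons, h x (by simp)]
    rw [ih (fun y hy => h y (by simp [hy]))]

theorem index_lt (a b m : Int) (hm : 0 < m) (_hab : a < b) (k : Nat)
    (hk : (k : Int) < (b - a + m - 1) / m) : a + m * (k : Int) < b := by
  have hq : ((b - a + m - 1) / m) * m ≤ b - a + m - 1 := Int.ediv_mul_le _ (by omega)
  have hk' : (k : Int) ≤ (b - a + m - 1) / m - 1 := by omega
  have : m * (k : Int) ≤ m * ((b - a + m - 1) / m - 1) :=
    mul_le_mul_of_nonneg_left hk' (by omega)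
  nlinarith

-- a slice on an empty list is empty
theorem slice?_nil (a b m : Int) (hm : m ≠ 0) :
    PySem.List.slice? ([] : List Char) (some a) (some b) m = some [] := by
  simp [PySem.List.slice?, hm]

-- the strided-index loop reads exactly the extended slice
theorem slice?_eq_map_pyRange (cl : List Char) (a b m : Int)
    (ha : 0 ≤ a) (hm : 0 < m) (hb : 0 ≤ b) (hlen : b.toNat ≤ cl.length) :
    (PySem.List.slice? cl (some a) (some b) m).getD []
      = (PySem.List.pyRange a b m).map (fun i => PySem.List.pyGetD cl i ' ') := by
  have hbl : b ≤ (cl.length : Int) := by omega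
  have hm0 : ¬ m = 0 := by omega
  rw [PySem.List.pyRange_of_pos a b hm]
  simp only [PySem.List.slice?, hm0, if_false, PySem.List.sliceIndices]
  have hlow : ¬ m < 0 := by omega
  simp only [hlow, if_false, if_neg (by omega : ¬ a < 0), if_neg (by omega : ¬ b < 0)]
  by_cases hal : a < (cl.length : Int)
  · have hs : min a (cl.length : Int) = a := by omega
    have he : min b (cl.length : Int) = b := by omega
    rw [hs, he]
    simp only [hm, ite_true, Option.getD_some, List.map_map]
    by_cases hab : a < b
    · simp only [hab, ite_true]
      refine filterMap_congr_some _ _ _ ?_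
      · intro k hk
        simp only [List.mem_range] at hk
        have hk' : (k : Int) < (b - a + m - 1) / m := by
          have h0 : 0 ≤ (b - a + m - 1) / m := Int.ediv_nonneg (by omega) (by omega)
          omega
        have hidx : a + m * (k : Int) < b := index_lt a b m hm hab k hk'
        have h0 : 0 ≤ a + m * (k : Int) := by positivity
        have hlt : (a + m * (k : Int)).toNat < cl.length := by omega
        simp only [Function.comp_apply]
        rw [PySem.List.pyGetD_eq_getElem cl ' ' h0 (by omega)]
        simp [List.getElem?_eq_getElem hlt]
    · simp [hab]
  · have hs : min a (cl.length : Int) = (cl.length : Int) := by omega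
    have he : min b (cl.length : Int) = b := by omega
    rw [hs, he]
    have h1 : ¬ ((cl.length : Int) < b) := by omega
    have h2 : ¬ (a < b) := by omega
    simp [hm, h1, h2]

-- B's result, seen as a character list: the slice of A's convert_list
theorem alt_toList (n t m p : Int) (hm : m ≠ 0) :
    (solution_alt n t m p).toList
      = (PySem.List.slice?
          ((PySem.List.pyRange 0 (t * m) 1).foldl
            (fun acc i => acc ++ (convertA (i.toNat + 1) i n).toList) [])
          (some (p - 1)) (some (t * m)) m).getD [] := by
  simp only [solution_alt, PySem.Str.slice?, PySem.Chars.slice?]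
  have hstream : (PySem.List.pyRange 0 (t * m) 1).flatMap (fun i => digitsB i n)
      = (PySem.List.pyRange 0 (t * m) 1).foldl
          (fun acc i => acc ++ (convertA (i.toNat + 1) i n).toList) [] := by
    rw [PySem.List.foldl_append_eq_flatMap]
    simp [digitsB_eq_convertA]
  rw [show (String.ofList ((PySem.List.pyRange 0 (t * m) 1).flatMap (fun i => digitsB i n))).toList
      = (PySem.List.pyRange 0 (t * m) 1).foldl
          (fun acc i => acc ++ (convertA (i.toNat + 1) i n).toList) [] by
    rw [← hstream]; simp]
  cases h : PySem.List.slice?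
      ((PySem.List.pyRange 0 (t * m) 1).foldl
        (fun acc i => acc ++ (convertA (i.toNat + 1) i n).toList) [])
      (some (p - 1)) (some (t * m)) m with
  | none =>
    exfalso
    simp only [PySem.List.slice?, hm, if_false] at h
    exact Option.some_ne_none _ h
  | some l => simp

-- an empty descending range
theorem pyRange_neg_eq_nil (a b m : Int) (hm : m ≤ -1) (hab : a ≤ b) :
    PySem.List.pyRange a b m = [] := by
  simp [PySem.List.pyRange, show ¬ m = 0 by omega, show ¬ (0 : Int) < m by omega,
    show ¬ b < a by omega]

-- ===== VERDICT (by name: the statement is the Claim_ definition above) =====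
theorem solution_spec : Claim_equal_solution := by
  intro n t m p _ hpre
  have hm0 : m ≠ 0 := by rcases hpre with h | h | h <;> omega
  unfold Spec_solution
  apply String.toList_inj.mp
  rw [alt_toList n t m p hm0]
  have hA : (solution n t m p).toList
      = (PySem.List.pyRange (p - 1) (t * m) m).map (fun i => PySem.List.pyGetD
          ((PySem.List.pyRange 0 (t * m) 1).foldl
            (fun acc i => acc ++ (convertA (i.toNat + 1) i n).toList) []) i ' ') := by
    simp only [solution]
    rw [show (fun (acc : List Char) (i : Int) =>
          (convertA (i.toNat + 1) i n).toList.foldl (fun l c => l ++ [c]) acc)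
        = (fun acc i => acc ++ (convertA (i.toNat + 1) i n).toList) from
        funext fun acc => funext fun i => foldl_append_singleton _ acc]
    rw [foldl_push_toList]
    rw [String.toList_empty, List.nil_append]
  rw [hA]
  have hlen0 : (t * m).toNat ≤
      ((PySem.List.pyRange 0 (t * m) 1).foldl
        (fun acc i => acc ++ (convertA (i.toNat + 1) i n).toList) []).length := by
    have := stream_len n (PySem.List.pyRange 0 (t * m) 1) []
    rw [PySem.List.length_pyRange_one] at this
    simpa using this
  generalize hcl : ((PySem.List.pyRange 0 (t * m) 1).foldl
      (fun acc i => acc ++ (convertA (i.toNat + 1) i n).toList) []) = cl at hlen0 ⊢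
  rcases hpre with ⟨hm, hple, hle⟩ | ⟨hm, hple, hle⟩ | ⟨hm, hp, ht, -⟩
  · -- both loops empty (ascending step): the answer is '' on each side
    have hcl0 : cl = [] := by
      rw [← hcl, PySem.List.pyRange_one_eq_nil (by omega)]; rfl
    rw [hcl0, slice?_nil _ _ _ hm0]
    rw [PySem.List.pyRange_of_pos _ _ (by omega : (0:Int) < m)]
    rw [if_neg (by omega : ¬ (p - 1 < t * m))]
    simp
  · -- both loops empty (descending step): the answer is '' on each side
    have hcl0 : cl = [] := by
      rw [← hcl, PySem.List.pyRange_one_eq_nil (by omega)]; rfl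
    rw [hcl0, slice?_nil _ _ _ hm0, pyRange_neg_eq_nil _ _ _ (by omega) (by omega)]
    simp
  · -- the working domain
    have hL : 0 < t * m := mul_pos (by omega) (by omega)
    rw [slice?_eq_map_pyRange cl (p - 1) (t * m) m (by omega) (by omega) (by omega) (by omega)]
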